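-- pv_equiv track=rewrite | github.com/minglok943/TSH_DO_OCR | regexGen.py | genRegexWithNum
-- ===== SOURCE A (Python) =====
-- def genRegexWithNum(text):
--
--     rePattern = ''
--     temp = text
--
--     first_digit = False
--     broken = False
--     digit_end = True
--     digit_count = 0
--     for index, char in enumerate(temp):
--         if ord(char) >= 48 and ord(char) <= 57:
--             if first_digit == False:
--                 first_digit = True
--                 digit_count = 1
--                 if broken == True:
--                     rePattern += '\d{'
--                 else:
--                     rePattern += '(\d{'
--             else:
--                 digit_count += 1
--             if index == len(temp)-1:
--                 rePattern += str(digit_count)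
--                 rePattern += '})'
--         else:
--             if first_digit == True:
--                 rePattern += str(digit_count)
--                 rePattern += '}'
--                 first_digit = False
--                 broken = True
--                 digit_count = 0
--
--             if char == ' ':
--                 rePattern += '\s*'
--             elif char == 'a' or char == 'A':
--                 rePattern += '[a,A]'
--             elif char == 'b' or char == 'B':
--                 rePattern += '[b,B]'
--             elif char == 'c' or char == 'C':
--                 rePattern += '[c,C]'
--             elif char == 'd' or char == 'D':
--                 rePattern += '[d,D]'
--             elif char == 'e' or char == 'E':
--                 rePattern += '[e,E]'
--             elif char == 'f' or char == 'F':
--                 rePattern += '[f,F]'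
--             elif char == 'g' or char == 'G':
--                 rePattern += '[g,G]'
--             elif char == 'h' or char == 'H':
--                 rePattern += '[h,H]'
--             elif char == 'j' or char == 'J':
--                 rePattern += '[j,J]'
--             elif char == 'l' or char == 'L':
--                 rePattern += '[l,L]'
--             elif char == 'm' or char == 'M':
--                 rePattern += '[m,M]'
--             elif char == 'n' or char == 'N':
--                 rePattern += '[n,N]'
--             elif char == 'q' or char == 'Q':
--                 rePattern += '[q,Q]'
--             elif char == 's' or char == 'S':
--                 rePattern += '[s,S]'
--             elif char == 't' or char == 'T':
--                 rePattern += '[t,T]'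
--             elif char == 'u' or char == 'U':
--                 rePattern += '[u,U]'
--             elif char == 'v' or char == 'V':
--                 rePattern += '[v,V]'
--             elif char == 'w' or char == 'W':
--                 rePattern += '[w,W]'
--             elif char == 'x' or char == 'X':
--                 rePattern += '[x,X]'
--             elif char == 'y' or char == 'Y':
--                 rePattern += '[y,Y]'
--             elif char == 'z' or char == 'Z':
--                 rePattern += '[z,Z]'
--             elif char == 'I' or char == '/' or char == '\\' or char == '!' or char == 'i':
--                 rePattern += '[1,I,\/,\\,!,i]'
--             elif char == '-':
--                 rePattern += '-*'
--             elif char == ',' or char == '.':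
--                 rePattern += '[.,\,]'
--             elif char == '(':
--                 rePattern += '\('
--             elif char == ')':
--                 rePattern += '\)'
--             elif char == 'O' or char == 'o':
--                 rePattern += '[0,O,o]'
--             elif char == 'R' or char == 'P' or char == 'K' or char =='p' or char =='r' or char =='k':
--                 rePattern += '[R,P,K,r,p,k]'
--             elif char == ':' or char == ';' or char == '+':
--                 rePattern += '[:,;,+]*'
--             else:
--                 rePattern += char
--                 rePattern += '*'
--
--     return rePattern
-- ===== SOURCE B (Python) =====
-- _CHAR_MAP = {' ': '\\s*'}
-- for _lo in 'abcdefghjlmnqstuvwxyz':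
--     _CHAR_MAP[_lo] = '[%s,%s]' % (_lo, _lo.upper())
--     _CHAR_MAP[_lo.upper()] = '[%s,%s]' % (_lo, _lo.upper())
-- for _c in 'I/\\!i':
--     _CHAR_MAP[_c] = '[1,I,\\/,\\,!,i]'
-- _CHAR_MAP['-'] = '-*'
-- for _c in ',.':
--     _CHAR_MAP[_c] = '[.,\\,]'
-- _CHAR_MAP['('] = '\\('
-- _CHAR_MAP[')'] = '\\)'
-- for _c in 'Oo':
--     _CHAR_MAP[_c] = '[0,O,o]'
-- for _c in 'RPKprk':
--     _CHAR_MAP[_c] = '[R,P,K,r,p,k]'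
-- for _c in ':;+':
--     _CHAR_MAP[_c] = '[:,;,+]*'
--
--
-- def genRegexWithNum(text):
--     n = len(text)
--     parts = []
--     seen_digits = False
--     i = 0
--     while i < n:
--         c = text[i]
--         if '0' <= c <= '9':
--             j = i
--             while j < n and '0' <= text[j] <= '9':
--                 j += 1
--             parts.append(('' if seen_digits else '(') + '\\d{' + str(j - i)
--                          + ('})' if j == n else '}'))
--             seen_digits = True
--             i = j
--         else:
--             parts.append(_CHAR_MAP.get(c, c + '*'))
--             i += 1
--     return ''.join(parts)
-- ===== Notes on version B (the rewrite author's own statement) =====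
-- stated objective: alternative
-- what changed: A's per-character state machine (first_digit/broken/digit_count flags threaded through one loop, with a 30-branch elif chain per character) is replaced by run-detection: B splits the text into maximal digit runs, emits each run's count group in one step (open paren only on the first run, closing paren only when the run ends the string), and maps each non-digit character through a precomputed char-to-pattern dict.
import Mathlib
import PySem

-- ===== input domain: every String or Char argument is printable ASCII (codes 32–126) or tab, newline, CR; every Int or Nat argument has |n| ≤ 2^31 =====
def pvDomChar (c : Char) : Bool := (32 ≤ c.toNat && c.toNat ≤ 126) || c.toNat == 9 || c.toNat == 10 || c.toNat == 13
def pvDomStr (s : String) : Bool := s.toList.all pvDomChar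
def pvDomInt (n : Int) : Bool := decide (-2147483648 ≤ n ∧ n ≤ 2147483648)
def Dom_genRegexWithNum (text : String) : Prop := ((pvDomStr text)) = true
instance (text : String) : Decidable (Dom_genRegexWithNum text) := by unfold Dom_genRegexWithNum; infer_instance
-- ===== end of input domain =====

-- B replaces A's per-character state machine by run-detection (maximal digit runs) plus a
-- character→pattern table; objective: alternative decomposition, same output string.

-- ===== PORT A =====

-- the elif chain of A's non-digit branch, in A's order
def pvCharPat (c : Char) : List Char :=
  if c = ' ' then "\\s*".toList
  else if c = 'a' ∨ c = 'A' then "[a,A]".toList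
  else if c = 'b' ∨ c = 'B' then "[b,B]".toList
  else if c = 'c' ∨ c = 'C' then "[c,C]".toList
  else if c = 'd' ∨ c = 'D' then "[d,D]".toList
  else if c = 'e' ∨ c = 'E' then "[e,E]".toList
  else if c = 'f' ∨ c = 'F' then "[f,F]".toList
  else if c = 'g' ∨ c = 'G' then "[g,G]".toList
  else if c = 'h' ∨ c = 'H' then "[h,H]".toList
  else if c = 'j' ∨ c = 'J' then "[j,J]".toList
  else if c = 'l' ∨ c = 'L' then "[l,L]".toList
  else if c = 'm' ∨ c = 'M' then "[m,M]".toList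
  else if c = 'n' ∨ c = 'N' then "[n,N]".toList
  else if c = 'q' ∨ c = 'Q' then "[q,Q]".toList
  else if c = 's' ∨ c = 'S' then "[s,S]".toList
  else if c = 't' ∨ c = 'T' then "[t,T]".toList
  else if c = 'u' ∨ c = 'U' then "[u,U]".toList
  else if c = 'v' ∨ c = 'V' then "[v,V]".toList
  else if c = 'w' ∨ c = 'W' then "[w,W]".toList
  else if c = 'x' ∨ c = 'X' then "[x,X]".toList
  else if c = 'y' ∨ c = 'Y' then "[y,Y]".toList
  else if c = 'z' ∨ c = 'Z' then "[z,Z]".toList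
  else if c = 'I' ∨ c = '/' ∨ c = '\\' ∨ c = '!' ∨ c = 'i' then "[1,I,\\/,\\,!,i]".toList
  else if c = '-' then "-*".toList
  else if c = ',' ∨ c = '.' then "[.,\\,]".toList
  else if c = '(' then "\\(".toList
  else if c = ')' then "\\)".toList
  else if c = 'O' ∨ c = 'o' then "[0,O,o]".toList
  else if c = 'R' ∨ c = 'P' ∨ c = 'K' ∨ c = 'p' ∨ c = 'r' ∨ c = 'k' then "[R,P,K,r,p,k]".toList
  else if c = ':' ∨ c = ';' ∨ c = '+' then "[:,;,+]*".toList
  else [c, '*']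

-- enumerate(temp) starting at a given index
def pvEnumFrom : Nat → List Char → List (Nat × Char)
  | _, [] => []
  | i, c :: t => (i, c) :: pvEnumFrom (i + 1) t

-- loop body of A; state = (rePattern, first_digit, broken, digit_count)
def pvStepA (n : Nat) (st : List Char × Bool × Bool × Int) (ic : Nat × Char) :
    List Char × Bool × Bool × Int :=
  if 48 ≤ ic.2.toNat ∧ ic.2.toNat ≤ 57 then
    let st2 : List Char × Bool × Bool × Int :=
      if st.2.1 = false then
        (st.1 ++ (if st.2.2.1 then "\\d{".toList else "(\\d{".toList), true, st.2.2.1, 1)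
      else (st.1, st.2.1, st.2.2.1, st.2.2.2 + 1)
    if ic.1 = n - 1 then
      (st2.1 ++ PySem.Int.toChars st2.2.2.2 ++ "})".toList, st2.2.1, st2.2.2.1, st2.2.2.2)
    else st2
  else
    if st.2.1 = true then
      (st.1 ++ PySem.Int.toChars st.2.2.2 ++ "}".toList ++ pvCharPat ic.2, false, true, 0)
    else
      (st.1 ++ pvCharPat ic.2, false, st.2.2.1, 0)

def genRegexWithNum (text : String) : String :=
  String.ofList
    (List.foldl (pvStepA text.toList.length) ([], false, false, 0)
      (pvEnumFrom 0 text.toList)).1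

-- ===== PORT B =====

-- the _CHAR_MAP dict of Source B, built in its insertion order
def pvCharMap : PySem.Dict Char (List Char) :=
  ((((((((((((((((((((((((((((((((((((((((((((((((((((((((((((((((PySem.Dict.empty.insert ' ' "\\s*".toList).insert 'a' "[a,A]".toList).insert 'A' "[a,A]".toList).insert 'b' "[b,B]".toList).insert 'B' "[b,B]".toList).insert 'c' "[c,C]".toList).insert 'C' "[c,C]".toList).insert 'd' "[d,D]".toList).insert 'D' "[d,D]".toList).insert 'e' "[e,E]".toList).insert 'E' "[e,E]".toList).insert 'f' "[f,F]".toList).insert 'F' "[f,F]".toList).insert 'g' "[g,G]".toList).insert 'G' "[g,G]".toList).insert 'h' "[h,H]".toList).insert 'H' "[h,H]".toList).insert 'j' "[j,J]".toList).insert 'J' "[j,J]".toList).insert 'l' "[l,L]".toList).insert 'L' "[l,L]".toList).insert 'm' "[m,M]".toList).insert 'M' "[m,M]".toList).insert 'n' "[n,N]".toList).insert 'N' "[n,N]".toList).insert 'q' "[q,Q]".toList).insert 'Q' "[q,Q]".toList).insert 's' "[s,S]".toList).insert 'S' "[s,S]".toList).insert 't' "[t,T]".toList).insert 'T' "[t,T]".toList).insert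 'u' "[u,U]".toList).insert 'U' "[u,U]".toList).insert 'v' "[v,V]".toList).insert 'V' "[v,V]".toList).insert 'w' "[w,W]".toList).insert 'W' "[w,W]".toList).insert 'x' "[x,X]".toList).insert 'X' "[x,X]".toList).insert 'y' "[y,Y]".toList).insert 'Y' "[y,Y]".toList).insert 'z' "[z,Z]".toList).insert 'Z' "[z,Z]".toList).insert 'I' "[1,I,\\/,\\,!,i]".toList).insert '/' "[1,I,\\/,\\,!,i]".toList).insert '\\' "[1,I,\\/,\\,!,i]".toList).insert '!' "[1,I,\\/,\\,!,i]".toList).insert 'i' "[1,I,\\/,\\,!,i]".toList).insert '-' "-*".toList).insert ',' "[.,\\,]".toList).insert '.' "[.,\\,]".toList).insert '(' "\\(".toList).insert ')' "\\)".toList).insert 'O' "[0,O,o]".toList).insert 'o' "[0,O,o]".toList).insert 'R' "[R,P,K,r,p,k]".toList).insert 'P' "[R,P,K,r,p,k]".toList).insert 'K' "[R,P,K,r,p,k]".toList).insert 'p' "[R,P,K,r,p,k]".toList).insert 'r' "[R,P,K,r,p,k]".toList).insert 'k' "[R,P,K,r,p,k]".toList).insert ':' "[:,;,+]*".toList).insert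 ';' "[:,;,+]*".toList).insert '+' "[:,;,+]*".toList)

-- '0' <= c <= '9'  (Source B's digit test)
def pvIsDig (c : Char) : Bool := '0' ≤ c && c ≤ '9'

-- the while-loop of Source B: peel a maximal digit run, or one mapped character
def pvAltLoop : List Char → Bool → List Char
  | [], _ => []
  | c :: t, seen =>
    if pvIsDig c then
      (if seen then [] else ['(']) ++ "\\d{".toList ++
        PySem.Int.toChars (((c :: t).takeWhile pvIsDig).length : Int) ++
        (if (c :: t).dropWhile pvIsDig = [] then "})".toList else "}".toList) ++
        pvAltLoop ((c :: t).dropWhile pvIsDig) true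
    else
      PySem.Dict.getD pvCharMap c [c, '*'] ++ pvAltLoop t seen
termination_by l _ => l.length
decreasing_by
  · simp only [List.dropWhile_cons, *, if_true]
    have := List.length_dropWhile_le pvIsDig t
    simp at this ⊢
    omega
  · simp

def genRegexWithNum_alt (text : String) : String :=
  String.ofList (pvAltLoop text.toList false)

-- ===== PRECONDITION & SPEC =====
def Spec_genRegexWithNum (text : String) (out : String) : Prop := out = genRegexWithNum_alt text
instance (text : String) (out : String) : Decidable (Spec_genRegexWithNum text out) := by unfold Spec_genRegexWithNum; infer_instance

-- ===== CLAIM (what is proved, stated in full; the proofs are below) =====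
def Claim_equal_genRegexWithNum : Prop := ∀ (text : String), Dom_genRegexWithNum text → Spec_genRegexWithNum text (genRegexWithNum text)

-- ===== LEMMAS AND PROOFS =====

theorem pvIsDig_iff (c : Char) : pvIsDig c = true ↔ (48 ≤ c.toNat ∧ c.toNat ≤ 57) := by
  unfold pvIsDig
  rw [Bool.and_eq_true, decide_eq_true_eq, decide_eq_true_eq, Char.le_def, Char.le_def,
      UInt32.le_iff_toNat_le, UInt32.le_iff_toNat_le]
  exact Iff.rfl

set_option maxRecDepth 65536 in
set_option maxHeartbeats 2000000 in
theorem pvMap_eq (c : Char) : PySem.Dict.getD pvCharMap c [c, '*'] = pvCharPat c := by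
  by_cases h1 : c = ' '
  · subst h1; decide
  by_cases h2 : c = 'a'
  · subst h2; decide
  by_cases h3 : c = 'A'
  · subst h3; decide
  by_cases h4 : c = 'b'
  · subst h4; decide
  by_cases h5 : c = 'B'
  · subst h5; decide
  by_cases h6 : c = 'c'
  · subst h6; decide
  by_cases h7 : c = 'C'
  · subst h7; decide
  by_cases h8 : c = 'd'
  · subst h8; decide
  by_cases h9 : c = 'D'
  · subst h9; decide
  by_cases h10 : c = 'e'
  · subst h10; decide
  by_cases h11 : c = 'E'
  · subst h11; decide
  by_cases h12 : c = 'f'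
  · subst h12; decide
  by_cases h13 : c = 'F'
  · subst h13; decide
  by_cases h14 : c = 'g'
  · subst h14; decide
  by_cases h15 : c = 'G'
  · subst h15; decide
  by_cases h16 : c = 'h'
  · subst h16; decide
  by_cases h17 : c = 'H'
  · subst h17; decide
  by_cases h18 : c = 'j'
  · subst h18; decide
  by_cases h19 : c = 'J'
  · subst h19; decide
  by_cases h20 : c = 'l'
  · subst h20; decide
  by_cases h21 : c = 'L'
  · subst h21; decide
  by_cases h22 : c = 'm'
  · subst h22; decide
  by_cases h23 : c = 'M'
  · subst h23; decide
  by_cases h24 : c = 'n'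
  · subst h24; decide
  by_cases h25 : c = 'N'
  · subst h25; decide
  by_cases h26 : c = 'q'
  · subst h26; decide
  by_cases h27 : c = 'Q'
  · subst h27; decide
  by_cases h28 : c = 's'
  · subst h28; decide
  by_cases h29 : c = 'S'
  · subst h29; decide
  by_cases h30 : c = 't'
  · subst h30; decide
  by_cases h31 : c = 'T'
  · subst h31; decide
  by_cases h32 : c = 'u'
  · subst h32; decide
  by_cases h33 : c = 'U'
  · subst h33; decide
  by_cases h34 : c = 'v'
  · subst h34; decide
  by_cases h35 : c = 'V'
  · subst h35; decide
  by_cases h36 : c = 'w'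
  · subst h36; decide
  by_cases h37 : c = 'W'
  · subst h37; decide
  by_cases h38 : c = 'x'
  · subst h38; decide
  by_cases h39 : c = 'X'
  · subst h39; decide
  by_cases h40 : c = 'y'
  · subst h40; decide
  by_cases h41 : c = 'Y'
  · subst h41; decide
  by_cases h42 : c = 'z'
  · subst h42; decide
  by_cases h43 : c = 'Z'
  · subst h43; decide
  by_cases h44 : c = 'I'
  · subst h44; decide
  by_cases h45 : c = '/'
  · subst h45; decide
  by_cases h46 : c = '\\'
  · subst h46; decide
  by_cases h47 : c = '!'
  · subst h47; decide
  by_cases h48 : c = 'i'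
  · subst h48; decide
  by_cases h49 : c = '-'
  · subst h49; decide
  by_cases h50 : c = ','
  · subst h50; decide
  by_cases h51 : c = '.'
  · subst h51; decide
  by_cases h52 : c = '('
  · subst h52; decide
  by_cases h53 : c = ')'
  · subst h53; decide
  by_cases h54 : c = 'O'
  · subst h54; decide
  by_cases h55 : c = 'o'
  · subst h55; decide
  by_cases h56 : c = 'R'
  · subst h56; decide
  by_cases h57 : c = 'P'
  · subst h57; decide
  by_cases h58 : c = 'K'
  · subst h58; decide
  by_cases h59 : c = 'p'
  · subst h59; decide
  by_cases h60 : c = 'r'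
  · subst h60; decide
  by_cases h61 : c = 'k'
  · subst h61; decide
  by_cases h62 : c = ':'
  · subst h62; decide
  by_cases h63 : c = ';'
  · subst h63; decide
  by_cases h64 : c = '+'
  · subst h64; decide
  unfold pvCharMap
  simp only [PySem.Dict.getD_insert, PySem.Dict.getD_empty]
  rw [if_neg h64, if_neg h63, if_neg h62, if_neg h61, if_neg h60, if_neg h59, if_neg h58, if_neg h57, if_neg h56, if_neg h55, if_neg h54, if_neg h53, if_neg h52, if_neg h51, if_neg h50, if_neg h49, if_neg h48, if_neg h47, if_neg h46, if_neg h45, if_neg h44, if_neg h43, if_neg h42, if_neg h41, if_neg h40, if_neg h39, if_neg h38, if_neg h37, if_neg h36, if_neg h35, if_neg h34, if_neg h33, if_neg h32, if_neg h31, if_neg h30, if_neg h29, if_neg h28, if_neg h27, if_neg h26, if_neg h25, if_neg h24, if_neg h23, if_neg h22, if_neg h21, if_neg h20, if_neg h19, if_neg h18, if_neg h17, if_neg h16, if_neg h15, if_neg h14, if_neg h13, if_neg h12, if_neg h11, if_neg h10, if_neg h9, if_neg h8, if_neg h7, if_neg h6, if_neg h5, if_neg h4, if_neg h3, if_neg h2,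 if_neg h1]
  unfold pvCharPat
  rw [if_neg (by simp [h1]), if_neg (by simp [h2, h3]), if_neg (by simp [h4, h5]), if_neg (by simp [h6, h7]), if_neg (by simp [h8, h9]), if_neg (by simp [h10, h11]), if_neg (by simp [h12, h13]), if_neg (by simp [h14, h15]), if_neg (by simp [h16, h17]), if_neg (by simp [h18, h19]), if_neg (by simp [h20, h21]), if_neg (by simp [h22, h23]), if_neg (by simp [h24, h25]), if_neg (by simp [h26, h27]), if_neg (by simp [h28, h29]), if_neg (by simp [h30, h31]), if_neg (by simp [h32, h33]), if_neg (by simp [h34, h35]), if_neg (by simp [h36, h37]), if_neg (by simp [h38, h39]), if_neg (by simp [h40, h41]), if_neg (by simp [h42, h43]), if_neg (by simp [h44, h45, h46, h47, h48]), if_neg (by simp [h49]), if_neg (by simp [h50, h51]), if_neg (by simp [h52]), if_neg (by simp [h53]), if_neg (by simp [h54, h55]), if_neg (by simp [h56, h57, h58, h59, h60, h61]), if_neg (by simp [h62, h63, h64])]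

theorem pvEnumFrom_append (xs : List Char) : ∀ (i : Nat) (ys : List Char),
    pvEnumFrom i (xs ++ ys) = pvEnumFrom i xs ++ pvEnumFrom (i + xs.length) ys := by
  induction xs with
  | nil => simp [pvEnumFrom]
  | cons c t ih =>
    intro i ys
    simp only [List.cons_append, pvEnumFrom, ih (i + 1) ys, List.length_cons]
    have : i + 1 + t.length = i + (t.length + 1) := by omega
    rw [this]

theorem pvFoldA_digit_cont (n : Nat) (ds : List Char) : ∀ (i : Nat) (p : List Char) (b : Bool) (cnt : Int),
    (∀ d ∈ ds, pvIsDig d = true) → i + ds.length ≤ n →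
    List.foldl (pvStepA n) (p, true, b, cnt) (pvEnumFrom i ds) =
      if i + ds.length = n ∧ ds ≠ [] then
        (p ++ PySem.Int.toChars (cnt + ds.length) ++ "})".toList, true, b, cnt + ds.length)
      else (p, true, b, cnt + ds.length) := by
  induction ds with
  | nil => intro i p b cnt _ _; simp [pvEnumFrom]
  | cons d t ih =>
    intro i p b cnt hdig hle
    have hd : 48 ≤ d.toNat ∧ d.toNat ≤ 57 := (pvIsDig_iff d).mp (hdig d (by simp))
    simp only [pvEnumFrom, List.foldl_cons]
    by_cases hi : i = n - 1
    · have ht : t = [] := by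
        cases t with
        | nil => rfl
        | cons x xs => exfalso; simp at hle; omega
      subst ht
      have hn1 : i + 1 = n := by simp at hle; omega
      rw [show pvStepA n (p, true, b, cnt) (i, d)
            = (p ++ PySem.Int.toChars (cnt + 1) ++ "})".toList, true, b, cnt + 1) from by
          simp [pvStepA, hd, hi]]
      simp [pvEnumFrom, hn1]
    · rw [show pvStepA n (p, true, b, cnt) (i, d) = (p, true, b, cnt + 1) from by
          simp [pvStepA, hd, hi]]
      rw [ih (i + 1) p b (cnt + 1) (fun x hx => hdig x (by simp [hx])) (by simp at hle ⊢; omega)]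
      have harith : cnt + 1 + (t.length : Int) = cnt + ((d :: t).length : Int) := by
        simp only [List.length_cons, Nat.cast_add, Nat.cast_one]; ring
      by_cases hcase : i + 1 + t.length = n ∧ t ≠ []
      · obtain ⟨hc1, hc2⟩ := hcase
        rw [if_pos ⟨hc1, hc2⟩, if_pos ⟨by simp; omega, by simp⟩, harith]
      · rw [if_neg hcase, if_neg ?hng]
        · rw [harith]
        case hng =>
          rintro ⟨h1, -⟩
          simp at h1
          rcases eq_or_ne t [] with he | he
          · subst he; simp at h1 hle; omega
          · exact hcase ⟨by omega, he⟩

theorem pvFoldA_digit_run (n : Nat) (ds : List Char) (i : Nat) (p : List Char) (b : Bool)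
    (hne : ds ≠ []) (hdig : ∀ d ∈ ds, pvIsDig d = true) (hle : i + ds.length ≤ n) :
    List.foldl (pvStepA n) (p, false, b, 0) (pvEnumFrom i ds) =
      if i + ds.length = n then
        (p ++ (if b then "\\d{".toList else "(\\d{".toList) ++
          PySem.Int.toChars (ds.length : Int) ++ "})".toList, true, b, (ds.length : Int))
      else
        (p ++ (if b then "\\d{".toList else "(\\d{".toList), true, b, (ds.length : Int)) := by
  cases ds with
  | nil => exact absurd rfl hne
  | cons d t =>
    have hd : 48 ≤ d.toNat ∧ d.toNat ≤ 57 := (pvIsDig_iff d).mp (hdig d (by simp))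
    simp only [pvEnumFrom, List.foldl_cons]
    by_cases hi : i = n - 1
    · have ht : t = [] := by
        cases t with
        | nil => rfl
        | cons x xs => exfalso; simp at hle; omega
      subst ht
      have hn1 : i + 1 = n := by simp at hle; omega
      rw [show pvStepA n (p, false, b, 0) (i, d)
            = (p ++ (if b then "\\d{".toList else "(\\d{".toList) ++
                PySem.Int.toChars 1 ++ "})".toList, true, b, 1) from by
          simp [pvStepA, hd, hi]]
      simp [pvEnumFrom, hn1]
    · rw [show pvStepA n (p, false, b, 0) (i, d)
            = (p ++ (if b then "\\d{".toList else "(\\d{".toList), true, b, 1) from by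
          simp [pvStepA, hd, hi]]
      rw [pvFoldA_digit_cont n t (i + 1) _ b 1 (fun x hx => hdig x (by simp [hx]))
        (by simp at hle ⊢; omega)]
      have harith : (1 : Int) + (t.length : Int) = (((d :: t).length : Nat) : Int) := by
        simp only [List.length_cons, Nat.cast_add, Nat.cast_one]; ring
      by_cases hcase : i + 1 + t.length = n ∧ t ≠ []
      · obtain ⟨hc1, hc2⟩ := hcase
        rw [if_pos ⟨hc1, hc2⟩, if_pos (show i + (d :: t).length = n by simp; omega), harith]
      · have hnot : ¬ (i + (d :: t).length = n) := by
          simp only [List.length_cons]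
          intro h1
          rcases eq_or_ne t [] with he | he
          · subst he; simp at h1; exact hi (by omega)
          · exact hcase ⟨by omega, he⟩
        rw [if_neg hcase, if_neg hnot, harith]

theorem pvDropWhile_head_false {p : Char → Bool} {l : List Char} {r : Char} {rt : List Char}
    (h : l.dropWhile p = r :: rt) : p r = false := by
  have := List.head?_dropWhile_not p l
  rw [h] at this
  simpa using this

theorem pvMain (n : Nat) : ∀ (m : Nat) (l : List Char) (i : Nat) (p : List Char) (b : Bool),
    l.length = m → i + l.length = n →
    (List.foldl (pvStepA n) (p, false, b, 0) (pvEnumFrom i l)).1 = p ++ pvAltLoop l b := by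
  intro m
  induction m using Nat.strong_induction_on with
  | _ m ih =>
    intro l i p b hm hn
    cases l with
    | nil => simp [pvEnumFrom, pvAltLoop]
    | cons c t =>
      by_cases hc : pvIsDig c = true
      · -- a maximal digit run
        have hsplit : c :: t = (c :: t).takeWhile pvIsDig ++ (c :: t).dropWhile pvIsDig :=
          (List.takeWhile_append_dropWhile).symm
        have hrunne : (c :: t).takeWhile pvIsDig ≠ [] := by simp [hc]
        have hrundig : ∀ d ∈ (c :: t).takeWhile pvIsDig, pvIsDig d = true := fun d hd =>
          List.mem_takeWhile_imp hd
        have hlen : ((c :: t).takeWhile pvIsDig).length + ((c :: t).dropWhile pvIsDig).length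
            = t.length + 1 := by
          have := congrArg List.length hsplit
          simp only [List.length_append, List.length_cons] at this
          omega
        simp only [pvAltLoop, hc, if_true]
        conv_lhs => rw [hsplit]
        rw [pvEnumFrom_append, List.foldl_append]
        have hle : i + ((c :: t).takeWhile pvIsDig).length ≤ n := by
          simp only [List.length_cons] at hn; omega
        rw [pvFoldA_digit_run n _ i p b hrunne hrundig hle]
        rcases hre : (c :: t).dropWhile pvIsDig with _ | ⟨r, rt⟩
        · have heq : i + ((c :: t).takeWhile pvIsDig).length = n := by
            rw [hre] at hlen
            simp only [List.length_nil] at hlen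
            simp only [List.length_cons] at hn
            omega
          rw [if_pos heq]
          simp only [pvEnumFrom, List.foldl_nil, pvAltLoop, List.append_nil]
          cases b <;> simp [List.append_assoc]
        · have hneq : ¬ (i + ((c :: t).takeWhile pvIsDig).length = n) := by
            rw [hre] at hlen
            simp only [List.length_cons] at hlen hn
            omega
          rw [if_neg hneq]
          have hr : pvIsDig r = false := pvDropWhile_head_false hre
          have hrn : ¬ (48 ≤ r.toNat ∧ r.toNat ≤ 57) := fun h => by
            rw [(pvIsDig_iff r).mpr h] at hr; exact absurd hr (by simp)
          simp only [pvEnumFrom, List.foldl_cons]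
          rw [show pvStepA n
                (p ++ (if b then "\\d{".toList else "(\\d{".toList), true, b,
                  (((c :: t).takeWhile pvIsDig).length : Int))
                (i + ((c :: t).takeWhile pvIsDig).length, r)
              = (p ++ (if b then "\\d{".toList else "(\\d{".toList) ++
                  PySem.Int.toChars (((c :: t).takeWhile pvIsDig).length : Int) ++
                  "}".toList ++ pvCharPat r, false, true, 0) from by
            simp [pvStepA, hrn]]
          have hrt : rt.length < m := by
            rw [hre] at hlen
            simp only [List.length_cons] at hlen hm
            omega
          rw [ih rt.length hrt rt (i + ((c :: t).takeWhile pvIsDig).length + 1) _ true rfl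
            (by rw [hre] at hlen
                simp only [List.length_cons] at hlen hn ⊢
                omega)]
          simp only [pvAltLoop, hr, Bool.false_eq_true, if_false, pvMap_eq, reduceCtorEq]
          cases b <;> simp [List.append_assoc]
      · -- single non-digit character
        have hcn : ¬ (48 ≤ c.toNat ∧ c.toNat ≤ 57) := fun h => hc ((pvIsDig_iff c).mpr h)
        simp only [pvEnumFrom, List.foldl_cons]
        rw [show pvStepA n (p, false, b, 0) (i, c) = (p ++ pvCharPat c, false, b, 0) from by
          simp [pvStepA, hcn]]
        rw [ih (m - 1) (by simp only [List.length_cons] at hm; omega) t (i + 1) _ b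
          (by simp only [List.length_cons] at hm; omega)
          (by simp only [List.length_cons] at hn ⊢; omega)]
        simp only [pvAltLoop, hc, Bool.false_eq_true, if_false, pvMap_eq]
        simp [List.append_assoc]

-- ===== VERDICT (by name: the statement is the Claim_ definition above) =====
theorem genRegexWithNum_spec : Claim_equal_genRegexWithNum := by
  intro text _
  unfold Spec_genRegexWithNum genRegexWithNum genRegexWithNum_alt
  have h := pvMain text.toList.length text.toList.length text.toList 0 [] false rfl (by simp)
  simp only [List.nil_append] at h
  rw [h]
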